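-- pv_equiv track=rewrite | github.com/kimjune01/june.kim | worklog/matroid_exchange2.py | temporal_neighborhoods_vertex_disjoint
-- ===== SOURCE A (Python) =====
-- def temporal_neighborhoods_vertex_disjoint(n, timestamps):
--     """
--     Stricter: 2-hop journey i -> c -> j via relay emitter e.
--     Requires: t(i,c) < t(e,j), e != i, and j != c (truly 2-hop, vertex-disjoint).
--     """
--     neighborhoods = {}
--     for i in range(n):
--         reachable = set()
--         for c in range(n):
--             if (i, c) not in timestamps:
--                 continue
--             t1 = timestamps[(i, c)]
--             for e in range(n):
--                 if e == i:
--                     continue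
--                 for j in range(n):
--                     if j == c:
--                         continue
--                     if (e, j) not in timestamps:
--                         continue
--                     t2 = timestamps[(e, j)]
--                     if t1 < t2:
--                         reachable.add(j)
--         neighborhoods[i] = frozenset(reachable)
--     return neighborhoods
-- ===== SOURCE B (Python) =====
-- def temporal_neighborhoods_vertex_disjoint(n, timestamps):
--     """
--     Same result via grouping + top-two statistics: j is reachable from i iff
--     the minimum outgoing time of i over relays c != j (top-two minima per row)
--     is below the maximum incoming time of j over emitters e != i (top-two
--     maxima per column).
--     """
--     rows = {}
--     for (a, b), t in timestamps.items():
--         if 0 <= a < n and 0 <= b < n: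
--             rows.setdefault(a, []).append((b, t))
--     cols = {}
--     for (a, b), t in timestamps.items():
--         if 0 <= a < n and 0 <= b < n:
--             cols.setdefault(b, []).append((a, t))
--     best_in = []
--     for j in range(n):
--         col = cols.get(j, [])
--         if col:
--             e1, M1 = max(col, key=lambda p: p[1])
--             rest = [v for e, v in col if e != e1]
--             best_in.append((e1, M1, max(rest) if rest else None))
--         else:
--             best_in.append(None)
--     neighborhoods = {}
--     for i in range(n):
--         row = rows.get(i, [])
--         reach = []
--         if row:
--             c1, m1 = min(row, key=lambda p: p[1])
--             rest = [v for c, v in row if c != c1]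
--             m2 = min(rest) if rest else None
--             for j in range(n):
--                 bj = best_in[j]
--                 if bj is None:
--                     continue
--                 e1, M1, M2 = bj
--                 m = m1 if c1 != j else m2
--                 M = M1 if e1 != i else M2
--                 if m is not None and M is not None and m < M:
--                     reach.append(j)
--         neighborhoods[i] = frozenset(reach)
--     return neighborhoods
-- ===== Notes on version B (the rewrite author's own statement) =====
-- stated objective: faster
-- what changed: Replaces the quadruple loop over (i,c,e,j) by grouping the timestamp entries into per-source rows and per-destination columns with top-two min/max statistics, then deciding each pair (i,j) in O(1) by comparing the minimum outgoing time over relays c != j with the maximum incoming time over emitters e != i.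
import Mathlib
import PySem

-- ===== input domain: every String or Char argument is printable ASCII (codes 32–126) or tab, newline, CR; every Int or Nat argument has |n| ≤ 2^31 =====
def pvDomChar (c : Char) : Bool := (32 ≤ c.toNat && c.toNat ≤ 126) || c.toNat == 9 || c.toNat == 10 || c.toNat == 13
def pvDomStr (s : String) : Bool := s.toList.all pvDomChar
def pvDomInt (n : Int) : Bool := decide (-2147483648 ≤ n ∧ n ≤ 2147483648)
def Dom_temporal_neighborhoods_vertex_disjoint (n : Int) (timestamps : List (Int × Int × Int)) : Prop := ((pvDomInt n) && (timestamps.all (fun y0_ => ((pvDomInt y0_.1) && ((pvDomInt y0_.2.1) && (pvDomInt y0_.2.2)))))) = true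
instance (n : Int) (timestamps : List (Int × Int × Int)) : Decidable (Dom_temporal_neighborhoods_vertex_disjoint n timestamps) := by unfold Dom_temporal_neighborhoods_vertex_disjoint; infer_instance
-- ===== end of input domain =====

-- B groups the timestamp entries by source row / destination column and keeps top-two
-- min/max statistics, deciding each pair (i,j) in O(1), instead of A's quadruple loop
-- (objective: faster).
-- Python's iteration order over a (frozen)set is not modelled (PYSEM.md): both ports
-- represent each frozenset value by its sorted element list — exact under set comparison.

-- ===== PORT A =====
-- the Python dict argument as a PySem.Dict over (src, dst) keys
def tnvdDict (timestamps : List (Int × Int × Int)) : PySem.Dict (Int × Int) Int :=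
  ⟨timestamps.map (fun y => ((y.1, y.2.1), y.2.2))⟩

-- the body of A's outer loop: the 'reachable' set accumulated over c, e, j
def tnvdReach (n : Int) (d : PySem.Dict (Int × Int) Int) (i : Int) : PySem.Set Int :=
  (PySem.List.pyRange 0 n 1).foldl (fun r c =>
    match d.get? (i, c) with
    | none => r                      -- if (i, c) not in timestamps: continue
    | some t1 =>
      (PySem.List.pyRange 0 n 1).foldl (fun r e =>
        if e = i then r              -- if e == i: continue
        else (PySem.List.pyRange 0 n 1).foldl (fun r j =>
          if j = c then r            -- if j == c: continue
          else match d.get? (e, j) with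
            | none => r              -- if (e, j) not in timestamps: continue
            | some t2 => if t1 < t2 then PySem.Set.add r j else r) r) r)
    PySem.Set.empty

def temporal_neighborhoods_vertex_disjoint (n : Int) (timestamps : List (Int × Int × Int)) : List (Int × List Int) :=
  let d := tnvdDict timestamps
  ((PySem.List.pyRange 0 n 1).foldl (fun nbs i =>
      nbs.insert i (PySem.List.sorted (tnvdReach n d i) (fun x => x)))
    PySem.Dict.empty).items

-- ===== PORT B =====
-- shared guard: 0 <= a < n and 0 <= b < n
def tnvdInRange (n : Int) (y : Int × Int × Int) : Bool :=
  decide (0 ≤ y.1) && decide (y.1 < n) && decide (0 ≤ y.2.1) && decide (y.2.1 < n)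

-- rows = {}; for (a, b), t in timestamps.items(): if in range: rows.setdefault(a, []).append((b, t))
def tnvdRows (n : Int) (timestamps : List (Int × Int × Int)) : PySem.Dict Int (List (Int × Int)) :=
  timestamps.foldl (fun d y =>
    if tnvdInRange n y then d.modify y.1 [] (· ++ [(y.2.1, y.2.2)]) else d) PySem.Dict.empty

-- cols = {}; for (a, b), t in timestamps.items(): if in range: cols.setdefault(b, []).append((a, t))
def tnvdCols (n : Int) (timestamps : List (Int × Int × Int)) : PySem.Dict Int (List (Int × Int)) :=
  timestamps.foldl (fun d y =>
    if tnvdInRange n y then d.modify y.2.1 [] (· ++ [(y.1, y.2.2)]) else d) PySem.Dict.empty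

-- one best_in entry: (e1, M1, max over the other emitters) for a nonempty column, None otherwise
-- (maxD defaults are never consulted: both calls are guarded by nonemptiness)
def tnvdTopIn (col : List (Int × Int)) : Option (Int × Int × Option Int) :=
  if col.isEmpty then none
  else
    let p := PySem.List.maxD col (fun q => q.2) (0, 0)
    let rest := (col.filter (fun q => q.1 != p.1)).map (fun q => q.2)
    some (p.1, p.2, if rest.isEmpty then none else some (PySem.List.maxD rest (fun x => x) 0))

-- the guard of B's inner loop: best_in[j] is not None, m/M selected past the excluded vertex, m < M
def tnvdCond (i c1 m1 : Int) (m2 : Option Int)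
    (bestIn : List (Option (Int × Int × Option Int))) (j : Int) : Bool :=
  match PySem.List.pyGetD bestIn j none with
  | none => false
  | some (e1, M1, M2) =>
    match (if c1 != j then some m1 else m2), (if e1 != i then some M1 else M2) with
    | some m, some M => decide (m < M)
    | _, _ => false

-- the body of B's outer loop (minD defaults are never consulted: guarded by nonemptiness)
def tnvdReachAlt (n i : Int) (bestIn : List (Option (Int × Int × Option Int)))
    (row : List (Int × Int)) : List Int :=
  if row.isEmpty then []
  else
    let p := PySem.List.minD row (fun q => q.2) (0, 0)
    let rest := (row.filter (fun q => q.1 != p.1)).map (fun q => q.2)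
    let m2 := if rest.isEmpty then none else some (PySem.List.minD rest (fun x => x) 0)
    (PySem.List.pyRange 0 n 1).foldl (fun r j =>
      if tnvdCond i p.1 p.2 m2 bestIn j then r ++ [j] else r) []

def temporal_neighborhoods_vertex_disjoint_alt (n : Int) (timestamps : List (Int × Int × Int)) : List (Int × List Int) :=
  let rows := tnvdRows n timestamps
  let cols := tnvdCols n timestamps
  let bestIn := (PySem.List.pyRange 0 n 1).foldl
    (fun acc j => acc ++ [tnvdTopIn (cols.getD j [])]) []
  ((PySem.List.pyRange 0 n 1).foldl (fun out i =>
      out.insert i (tnvdReachAlt n i bestIn (rows.getD i []))) PySem.Dict.empty).items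

-- ===== PRECONDITION & SPEC =====
-- Pre_ excludes association lists with duplicate (src, dst) keys, on which the Python dict
-- collapses entries (last value wins) while the assoc-list convention looks up the first match.
def Pre_temporal_neighborhoods_vertex_disjoint (n : Int) (timestamps : List (Int × Int × Int)) : Prop :=
  (timestamps.map (fun y => (y.1, y.2.1))).Nodup
instance (n : Int) (timestamps : List (Int × Int × Int)) : Decidable (Pre_temporal_neighborhoods_vertex_disjoint n timestamps) := by unfold Pre_temporal_neighborhoods_vertex_disjoint; infer_instance

def pvWitness_temporal_neighborhoods_vertex_disjoint : Int × (List (Int × Int × Int)) :=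
  (2, [(0, 0, 0), (1, 1, 5)])

def Spec_temporal_neighborhoods_vertex_disjoint (n : Int) (timestamps : List (Int × Int × Int)) (out : List (Int × List Int)) : Prop := out = temporal_neighborhoods_vertex_disjoint_alt n timestamps
instance (n : Int) (timestamps : List (Int × Int × Int)) (out : List (Int × List Int)) : Decidable (Spec_temporal_neighborhoods_vertex_disjoint n timestamps out) := by unfold Spec_temporal_neighborhoods_vertex_disjoint; infer_instance

-- ===== CLAIM (what is proved, stated in full; the proofs are below) =====
def Claim_equal_temporal_neighborhoods_vertex_disjoint : Prop := ∀ (n : Int) (timestamps : List (Int × Int × Int)), Dom_temporal_neighborhoods_vertex_disjoint n timestamps → Pre_temporal_neighborhoods_vertex_disjoint n timestamps → Spec_temporal_neighborhoods_vertex_disjoint n timestamps (temporal_neighborhoods_vertex_disjoint n timestamps)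

-- ===== LEMMAS AND PROOFS =====

-- generic: membership through a foldl whose step adds according to Q
theorem pv_mem_foldl {α β : Type} (L : List β) (f : List α → β → List α) (Q : β → α → Prop)
    (h : ∀ r y x, x ∈ f r y ↔ x ∈ r ∨ Q y x) :
    ∀ (r : List α) (x : α), x ∈ L.foldl f r ↔ x ∈ r ∨ ∃ y ∈ L, Q y x := by
  induction L with
  | nil => simp
  | cons b L ih =>
    intro r x
    simp only [List.foldl_cons, ih, h, List.mem_cons]
    constructor
    · rintro ((h1 | h1) | ⟨y, hy, hQ⟩)
      · exact Or.inl h1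
      · exact Or.inr ⟨b, Or.inl rfl, h1⟩
      · exact Or.inr ⟨y, Or.inr hy, hQ⟩
    · rintro (h1 | ⟨y, (rfl | hy), hQ⟩)
      · exact Or.inl (Or.inl h1)
      · exact Or.inl (Or.inr hQ)
      · exact Or.inr ⟨y, hy, hQ⟩

-- generic: a foldl whose step preserves Nodup preserves Nodup
theorem pv_nodup_foldl {α β : Type} (L : List β) (f : List α → β → List α)
    (h : ∀ r y, r.Nodup → (f r y).Nodup) :
    ∀ r : List α, r.Nodup → (L.foldl f r).Nodup := by
  induction L with
  | nil => intro r hr; simpa using hr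
  | cons b L ih => intro r hr; exact ih _ (h r b hr)

-- A-side lookup ↔ raw-list membership (under Pre_: unique keys)
theorem pv_get?_iff (timestamps : List (Int × Int × Int))
    (hk : (timestamps.map (fun y => (y.1, y.2.1))).Nodup) (a b t : Int) :
    (tnvdDict timestamps).get? (a, b) = some t ↔ (a, b, t) ∈ timestamps := by
  have hnd : (tnvdDict timestamps).keys.Nodup := by
    simpa [tnvdDict, PySem.Dict.keys_mk, List.map_map, Function.comp] using hk
  rw [PySem.Dict.get?_eq_some_iff_mem_items _ _ _ hnd]
  constructor
  · intro h
    simp only [tnvdDict, List.mem_map] at h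
    obtain ⟨⟨y1, y2, y3⟩, hy, he⟩ := h
    simp only [Prod.mk.injEq] at he
    obtain ⟨⟨rfl, rfl⟩, rfl⟩ := he
    exact hy
  · intro h
    simp only [tnvdDict, List.mem_map]
    exact ⟨(a, b, t), h, rfl⟩

-- membership in A's reachable set
theorem pv_mem_reach (n : Int) (timestamps : List (Int × Int × Int))
    (hk : (timestamps.map (fun y => (y.1, y.2.1))).Nodup) (i x : Int) :
    x ∈ tnvdReach n (tnvdDict timestamps) i ↔
      (0 ≤ x ∧ x < n) ∧
        ∃ t1, (∃ c, (0 ≤ c ∧ c < n) ∧ c ≠ x ∧ (i, c, t1) ∈ timestamps) ∧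
          ∃ t2, (∃ e, (0 ≤ e ∧ e < n) ∧ e ≠ i ∧ (e, x, t2) ∈ timestamps) ∧ t1 < t2 := by
  set d := tnvdDict timestamps with hd
  have hJ : ∀ (c e : Int) (t1 : Int) (r : List Int) (x : Int),
      x ∈ (PySem.List.pyRange 0 n 1).foldl (fun r j =>
        if j = c then r
        else match d.get? (e, j) with
          | none => r
          | some t2 => if t1 < t2 then PySem.Set.add r j else r) r ↔
      x ∈ r ∨ ∃ j ∈ PySem.List.pyRange 0 n 1,
        j ≠ c ∧ ∃ t2, d.get? (e, j) = some t2 ∧ t1 < t2 ∧ x = j := by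
    intro c e t1 r x
    refine pv_mem_foldl _ _ (fun j x => j ≠ c ∧ ∃ t2, d.get? (e, j) = some t2 ∧ t1 < t2 ∧ x = j) ?_ r x
    intro r y x
    by_cases hyc : y = c
    · simp [hyc]
    · simp only [if_neg hyc]
      cases hget : d.get? (e, y) with
      | none => simp [hyc]
      | some t2 =>
        by_cases hlt : t1 < t2
        · simp [hyc, hlt, PySem.Set.mem_add, eq_comm]
        · simp [hyc, hlt]
  have hE : ∀ (c : Int) (t1 : Int) (r : List Int) (x : Int),
      x ∈ (PySem.List.pyRange 0 n 1).foldl (fun r e =>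
        if e = i then r
        else (PySem.List.pyRange 0 n 1).foldl (fun r j =>
          if j = c then r
          else match d.get? (e, j) with
            | none => r
            | some t2 => if t1 < t2 then PySem.Set.add r j else r) r) r ↔
      x ∈ r ∨ ∃ e ∈ PySem.List.pyRange 0 n 1, e ≠ i ∧
        ∃ j ∈ PySem.List.pyRange 0 n 1,
          j ≠ c ∧ ∃ t2, d.get? (e, j) = some t2 ∧ t1 < t2 ∧ x = j := by
    intro c t1 r x
    refine pv_mem_foldl _ _ (fun e x => e ≠ i ∧ ∃ j ∈ PySem.List.pyRange 0 n 1,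
      j ≠ c ∧ ∃ t2, d.get? (e, j) = some t2 ∧ t1 < t2 ∧ x = j) ?_ r x
    intro r y x
    by_cases hyi : y = i
    · simp [hyi]
    · simp only [if_neg hyi, hJ]
      tauto
  have hC : x ∈ tnvdReach n d i ↔
      ∃ c ∈ PySem.List.pyRange 0 n 1, ∃ t1, d.get? (i, c) = some t1 ∧
        ∃ e ∈ PySem.List.pyRange 0 n 1, e ≠ i ∧
          ∃ j ∈ PySem.List.pyRange 0 n 1,
            j ≠ c ∧ ∃ t2, d.get? (e, j) = some t2 ∧ t1 < t2 ∧ x = j := by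
    unfold tnvdReach
    rw [pv_mem_foldl _ _ (fun c x => ∃ t1, d.get? (i, c) = some t1 ∧
      ∃ e ∈ PySem.List.pyRange 0 n 1, e ≠ i ∧
        ∃ j ∈ PySem.List.pyRange 0 n 1,
          j ≠ c ∧ ∃ t2, d.get? (e, j) = some t2 ∧ t1 < t2 ∧ x = j) ?_ _ x]
    · simp [PySem.Set.empty]
    · intro r y x
      cases hget : d.get? (i, y) with
      | none => simp [hget]
      | some t1 =>
        simp only [hget, hE, Option.some.injEq, exists_eq_left']
  rw [hC]
  simp only [PySem.List.mem_pyRange_one, hd, pv_get?_iff timestamps hk]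
  constructor
  · rintro ⟨c, hc, t1, h1, e, he, hei, j, hj, hjc, t2, h2, hlt, rfl⟩
    exact ⟨⟨hj.1, hj.2⟩, t1, ⟨c, ⟨hc.1, hc.2⟩, fun h => hjc h.symm, h1⟩, t2, ⟨e, ⟨he.1, he.2⟩, hei, h2⟩, hlt⟩
  · rintro ⟨hx, t1, ⟨c, hc, hcx, h1⟩, t2, ⟨e, he, hei, h2⟩, hlt⟩
    exact ⟨c, ⟨hc.1, hc.2⟩, t1, h1, e, ⟨he.1, he.2⟩, hei, x, ⟨hx.1, hx.2⟩,
      fun h => hcx h.symm, t2, h2, hlt, rfl⟩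

-- A's reachable set has no duplicates (it is a PySem.Set)
theorem pv_nodup_reach (n : Int) (d : PySem.Dict (Int × Int) Int) (i : Int) :
    (tnvdReach n d i).Nodup := by
  unfold tnvdReach
  refine pv_nodup_foldl _ _ ?_ _ (by simp [PySem.Set.empty])
  intro r c hr
  cases d.get? (i, c) with
  | none => exact hr
  | some t1 =>
    refine pv_nodup_foldl _ _ ?_ _ hr
    intro r e hr
    by_cases hei : e = i
    · simpa [hei] using hr
    · simp only [if_neg hei]
      refine pv_nodup_foldl _ _ ?_ _ hr
      intro r j hr
      by_cases hjc : j = c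
      · simpa [hjc] using hr
      · simp only [if_neg hjc]
        cases d.get? (e, j) with
        | none => exact hr
        | some t2 =>
          by_cases hlt : t1 < t2
          · simpa [hlt] using PySem.Set.nodup_add r j hr
          · simpa [hlt] using hr

-- proof-side names for the grouped lists and B's precomputation
def pvItems (n : Int) (timestamps : List (Int × Int × Int)) : List (Int × Int × Int) :=
  timestamps.filter (tnvdInRange n)

def pvRow (n : Int) (timestamps : List (Int × Int × Int)) (i : Int) : List (Int × Int) :=
  ((pvItems n timestamps).filter (fun y => y.1 == i)).map (fun y => (y.2.1, y.2.2))

def pvCol (n : Int) (timestamps : List (Int × Int × Int)) (j : Int) : List (Int × Int) :=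
  ((pvItems n timestamps).filter (fun y => y.2.1 == j)).map (fun y => (y.1, y.2.2))

def pvBestIn (n : Int) (timestamps : List (Int × Int × Int)) : List (Option (Int × Int × Option Int)) :=
  (PySem.List.pyRange 0 n 1).foldl
    (fun acc j => acc ++ [tnvdTopIn ((tnvdCols n timestamps).getD j [])]) []

-- the grouping loops compute the per-vertex filters
theorem pv_rows_getD (n : Int) (timestamps : List (Int × Int × Int)) (i : Int) :
    (tnvdRows n timestamps).getD i [] = pvRow n timestamps i := by
  unfold tnvdRows pvRow pvItems
  rw [← List.foldl_filter]
  have h := PySem.Dict.getD_foldl_modify_append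
    ((timestamps.filter (tnvdInRange n)).map (fun y => (y.1, (y.2.1, y.2.2))))
    (PySem.Dict.empty) i
  rw [List.foldl_map] at h
  rw [h]
  simp

theorem pv_cols_getD (n : Int) (timestamps : List (Int × Int × Int)) (j : Int) :
    (tnvdCols n timestamps).getD j [] = pvCol n timestamps j := by
  unfold tnvdCols pvCol pvItems
  rw [← List.foldl_filter]
  have h := PySem.Dict.getD_foldl_modify_append
    ((timestamps.filter (tnvdInRange n)).map (fun y => (y.2.1, (y.1, y.2.2))))
    (PySem.Dict.empty) j
  rw [List.foldl_map] at h
  rw [h]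
  simp [List.filter_map, List.map_map, Function.comp]

-- best_in as a map over range(n), and its entries
theorem pv_bestIn_eq_map (n : Int) (timestamps : List (Int × Int × Int)) :
    pvBestIn n timestamps =
      (PySem.List.pyRange 0 n 1).map (fun j => tnvdTopIn (pvCol n timestamps j)) := by
  unfold pvBestIn
  rw [PySem.List.foldl_append_singleton_eq_map]
  simp [pv_cols_getD]

theorem pv_bestIn_getD (n : Int) (timestamps : List (Int × Int × Int)) (j : Int)
    (hj : 0 ≤ j ∧ j < n) :
    PySem.List.pyGetD (pvBestIn n timestamps) j none = tnvdTopIn (pvCol n timestamps j) := by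
  rw [pv_bestIn_eq_map]
  exact PySem.List.pyGetD_map_pyRange_of_nonneg _ n j none hj.1 hj.2

-- membership in the per-pair candidate lists, in terms of the raw input
theorem pv_mem_ms (n : Int) (timestamps : List (Int × Int × Int)) (i j : Int)
    (hi : 0 ≤ i ∧ i < n) (t : Int) :
    t ∈ ((pvRow n timestamps i).filter (fun q => q.1 != j)).map (fun q => q.2) ↔
      ∃ c, (0 ≤ c ∧ c < n) ∧ c ≠ j ∧ (i, c, t) ∈ timestamps := by
  simp only [pvRow, pvItems, tnvdInRange, List.mem_map, List.mem_filter, bne_iff_ne, ne_eq,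
    decide_eq_true_eq, Bool.and_eq_true, beq_iff_eq]
  constructor
  · rintro ⟨⟨c0, t0⟩, ⟨⟨⟨y1, y2, y3⟩, ⟨⟨hy, hb⟩, ha⟩, heq⟩, hne⟩, rfl⟩
    simp only [Prod.mk.injEq] at heq
    obtain ⟨rfl, rfl⟩ := heq
    subst ha
    exact ⟨y2, ⟨hb.1.2, hb.2⟩, by simpa using hne, hy⟩
  · rintro ⟨c, hc, hcj, hmem⟩
    exact ⟨(c, t), ⟨⟨(i, c, t), ⟨⟨hmem, ⟨⟨hi.1, hi.2⟩, hc.1⟩, hc.2⟩, rfl⟩, rfl⟩, by simpa using hcj⟩, rfl⟩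

theorem pv_mem_Ms (n : Int) (timestamps : List (Int × Int × Int)) (i j : Int)
    (hj : 0 ≤ j ∧ j < n) (t : Int) :
    t ∈ ((pvCol n timestamps j).filter (fun q => q.1 != i)).map (fun q => q.2) ↔
      ∃ e, (0 ≤ e ∧ e < n) ∧ e ≠ i ∧ (e, j, t) ∈ timestamps := by
  simp only [pvCol, pvItems, tnvdInRange, List.mem_map, List.mem_filter, bne_iff_ne, ne_eq,
    decide_eq_true_eq, Bool.and_eq_true, beq_iff_eq]
  constructor
  · rintro ⟨⟨e0, t0⟩, ⟨⟨⟨y1, y2, y3⟩, ⟨⟨hy, hb⟩, ha⟩, heq⟩, hne⟩, rfl⟩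
    simp only [Prod.mk.injEq] at heq
    obtain ⟨rfl, rfl⟩ := heq
    subst ha
    exact ⟨y1, ⟨hb.1.1.1, hb.1.1.2⟩, by simpa using hne, hy⟩
  · rintro ⟨e, he, hei, hmem⟩
    exact ⟨(e, t), ⟨⟨(e, j, t), ⟨⟨hmem, ⟨⟨he.1, he.2⟩, hj.1⟩, hj.2⟩, rfl⟩, rfl⟩, by simpa using hei⟩, rfl⟩

-- the selected minimum / maximum of B, as Options
def pvSelMin (row : List (Int × Int)) (j : Int) : Option Int :=
  let p := PySem.List.minD row (fun q => q.2) (0, 0)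
  let rest := (row.filter (fun q => q.1 != p.1)).map (fun q => q.2)
  if p.1 != j then some p.2
  else if rest.isEmpty then none else some (PySem.List.minD rest (fun x => x) 0)

def pvSelMax (col : List (Int × Int)) (i : Int) : Option Int :=
  let p := PySem.List.maxD col (fun q => q.2) (0, 0)
  let rest := (col.filter (fun q => q.1 != p.1)).map (fun q => q.2)
  if p.1 != i then some p.2
  else if rest.isEmpty then none else some (PySem.List.maxD rest (fun x => x) 0)

-- B's top-two selection answers the 'is there a smaller element outside j?' question
theorem pv_selMin_spec (row : List (Int × Int)) (hrow : row ≠ []) (j M : Int) :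
    (∃ t ∈ (row.filter (fun q => q.1 != j)).map (fun q => q.2), t < M) ↔
      ∃ m, pvSelMin row j = some m ∧ m < M := by
  unfold pvSelMin
  set p := PySem.List.minD row (fun q => q.2) (0, 0) with hp
  by_cases hpj : p.1 = j
  · simp only [hpj, bne_self_eq_false, Bool.false_eq_true, if_false]
    set ms := (row.filter (fun q => q.1 != j)).map (fun q => q.2) with hms
    by_cases hE : ms.isEmpty
    · have : ms = [] := by simpa [List.isEmpty_iff] using hE
      simp [this]
    · have hne : ms ≠ [] := by simpa [List.isEmpty_iff] using hE
      simp only [hE, Bool.false_eq_true, if_false, Option.some.injEq, exists_eq_left']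
      constructor
      · rintro ⟨t, ht, hlt⟩
        exact lt_of_le_of_lt (PySem.List.minD_id_le ms 0 t ht) hlt
      · intro hlt
        exact ⟨_, PySem.List.minD_mem ms (fun x => x) 0 hne, hlt⟩
  · have hb : (p.1 != j) = true := by simpa using hpj
    simp only [hb, if_true, Option.some.injEq, exists_eq_left']
    constructor
    · rintro ⟨t, ht, hlt⟩
      rw [List.mem_map] at ht
      obtain ⟨q, hq, rfl⟩ := ht
      rw [List.mem_filter] at hq
      exact lt_of_le_of_lt (PySem.List.key_minD_le row (fun q => q.2) (0, 0) hrow q hq.1) hlt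
    · intro hlt
      refine ⟨p.2, ?_, hlt⟩
      rw [List.mem_map]
      refine ⟨p, ?_, rfl⟩
      rw [List.mem_filter]
      exact ⟨PySem.List.minD_mem row (fun q => q.2) (0, 0) hrow, by simpa using hpj⟩

theorem pv_selMax_spec (col : List (Int × Int)) (hcol : col ≠ []) (i m : Int) :
    (∃ t ∈ (col.filter (fun q => q.1 != i)).map (fun q => q.2), m < t) ↔
      ∃ M, pvSelMax col i = some M ∧ m < M := by
  unfold pvSelMax
  set p := PySem.List.maxD col (fun q => q.2) (0, 0) with hp
  by_cases hpi : p.1 = i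
  · simp only [hpi, bne_self_eq_false, Bool.false_eq_true, if_false]
    set Ms := (col.filter (fun q => q.1 != i)).map (fun q => q.2) with hMs
    by_cases hE : Ms.isEmpty
    · have : Ms = [] := by simpa [List.isEmpty_iff] using hE
      simp [this]
    · have hne : Ms ≠ [] := by simpa [List.isEmpty_iff] using hE
      simp only [hE, Bool.false_eq_true, if_false, Option.some.injEq, exists_eq_left']
      constructor
      · rintro ⟨t, ht, hlt⟩
        exact lt_of_lt_of_le hlt (PySem.List.le_maxD_id Ms 0 t ht)
      · intro hlt
        exact ⟨_, PySem.List.maxD_mem Ms (fun x => x) 0 hne, hlt⟩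
  · have hb : (p.1 != i) = true := by simpa using hpi
    simp only [hb, if_true, Option.some.injEq, exists_eq_left']
    constructor
    · rintro ⟨t, ht, hlt⟩
      rw [List.mem_map] at ht
      obtain ⟨q, hq, rfl⟩ := ht
      rw [List.mem_filter] at hq
      exact lt_of_lt_of_le hlt (PySem.List.le_key_maxD col (fun q => q.2) (0, 0) hcol q hq.1)
    · intro hlt
      refine ⟨p.2, ?_, hlt⟩
      rw [List.mem_map]
      refine ⟨p, ?_, rfl⟩
      rw [List.mem_filter]
      exact ⟨PySem.List.maxD_mem col (fun q => q.2) (0, 0) hcol, by simpa using hpi⟩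

-- B's inner-loop guard decides exactly the existential pair condition
theorem pv_cond_iff (i j : Int) (row col : List (Int × Int)) (hrow : row ≠ [])
    (bestIn : List (Option (Int × Int × Option Int)))
    (hb : PySem.List.pyGetD bestIn j none = tnvdTopIn col) :
    tnvdCond i (PySem.List.minD row (fun q => q.2) (0, 0)).1
      (PySem.List.minD row (fun q => q.2) (0, 0)).2
      (if ((row.filter (fun q => q.1 != (PySem.List.minD row (fun q => q.2) (0, 0)).1)).map (fun q => q.2)).isEmpty
       then none
       else some (PySem.List.minD ((row.filter (fun q => q.1 != (PySem.List.minD row (fun q => q.2) (0, 0)).1)).map (fun q => q.2)) (fun x => x) 0))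
      bestIn j = true ↔
    ∃ t1 ∈ (row.filter (fun q => q.1 != j)).map (fun q => q.2),
      ∃ t2 ∈ (col.filter (fun q => q.1 != i)).map (fun q => q.2), t1 < t2 := by
  have key : (∃ t1 ∈ (row.filter (fun q => q.1 != j)).map (fun q => q.2),
      ∃ t2 ∈ (col.filter (fun q => q.1 != i)).map (fun q => q.2), t1 < t2) ↔
      (col ≠ [] ∧ ∃ m M, pvSelMin row j = some m ∧ pvSelMax col i = some M ∧ m < M) := by
    by_cases hcol : col = []
    · subst hcol; simp
    · simp only [hcol, ne_eq, not_false_eq_true, true_and]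
      constructor
      · rintro ⟨t1, h1, t2, h2, hlt⟩
        obtain ⟨m, hm, hmlt⟩ := (pv_selMin_spec row hrow j t2).1 ⟨t1, h1, hlt⟩
        obtain ⟨M, hM, hlt'⟩ := (pv_selMax_spec col hcol i m).1 ⟨t2, h2, hmlt⟩
        exact ⟨m, M, hm, hM, hlt'⟩
      · rintro ⟨m, M, hm, hM, hlt⟩
        obtain ⟨t2, h2, h2'⟩ := (pv_selMax_spec col hcol i m).2 ⟨M, hM, hlt⟩
        obtain ⟨t1, h1, h1'⟩ := (pv_selMin_spec row hrow j t2).2 ⟨m, hm, h2'⟩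
        exact ⟨t1, h1, t2, h2, h1'⟩
  rw [key]
  unfold tnvdCond
  rw [hb]
  unfold tnvdTopIn
  by_cases hcol : col.isEmpty
  · have : col = [] := by simpa [List.isEmpty_iff] using hcol
    simp [this]
  · have hcolne : col ≠ [] := by simpa [List.isEmpty_iff] using hcol
    rw [if_neg (by simpa using hcol)]
    simp only [ne_eq, hcolne, not_false_eq_true, true_and]
    have hmin : (if (PySem.List.minD row (fun q => q.2) (0, 0)).1 != j
        then some (PySem.List.minD row (fun q => q.2) (0, 0)).2
        else (if ((row.filter (fun q => q.1 != (PySem.List.minD row (fun q => q.2) (0, 0)).1)).map (fun q => q.2)).isEmpty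
              then none
              else some (PySem.List.minD ((row.filter (fun q => q.1 != (PySem.List.minD row (fun q => q.2) (0, 0)).1)).map (fun q => q.2)) (fun x => x) 0))) = pvSelMin row j := rfl
    have hmax : (if (PySem.List.maxD col (fun q => q.2) (0, 0)).1 != i
        then some (PySem.List.maxD col (fun q => q.2) (0, 0)).2
        else (if ((col.filter (fun q => q.1 != (PySem.List.maxD col (fun q => q.2) (0, 0)).1)).map (fun q => q.2)).isEmpty
              then none
              else some (PySem.List.maxD ((col.filter (fun q => q.1 != (PySem.List.maxD col (fun q => q.2) (0, 0)).1)).map (fun q => q.2)) (fun x => x) 0))) = pvSelMax col i := rfl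
    rw [hmin, hmax]
    cases hm : pvSelMin row j with
    | none => simp
    | some m =>
      cases hM : pvSelMax col i with
      | none => simp
      | some M => simp

-- per-vertex equality of the two reachability lists
theorem pv_reach_eq (n : Int) (timestamps : List (Int × Int × Int))
    (hk : (timestamps.map (fun y => (y.1, y.2.1))).Nodup) (i : Int)
    (hi : 0 ≤ i ∧ i < n) :
    PySem.List.sorted (tnvdReach n (tnvdDict timestamps) i) (fun x => x) =
      tnvdReachAlt n i (pvBestIn n timestamps) ((tnvdRows n timestamps).getD i []) := by
  rw [pv_rows_getD]
  by_cases hrow : pvRow n timestamps i = []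
  · rw [hrow]
    have hA : tnvdReach n (tnvdDict timestamps) i = [] := by
      rw [List.eq_nil_iff_forall_not_mem]
      intro x hx
      rw [pv_mem_reach n timestamps hk i x] at hx
      obtain ⟨_, t1, ⟨c, hc, _, hmem⟩, _⟩ := hx
      have : ((c, t1) : Int × Int) ∈ pvRow n timestamps i := by
        simp only [pvRow, pvItems, tnvdInRange, List.mem_map, List.mem_filter,
          decide_eq_true_eq, Bool.and_eq_true, beq_iff_eq]
        exact ⟨(i, c, t1), ⟨⟨hmem, ⟨⟨hi.1, hi.2⟩, hc.1⟩, hc.2⟩, rfl⟩, rfl⟩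
      rw [hrow] at this
      simp at this
    rw [hA]
    rfl
  · unfold tnvdReachAlt
    rw [if_neg (by simpa [List.isEmpty_iff] using hrow)]
    simp only []
    rw [PySem.List.foldl_append_if _ (fun x => x)]
    simp only [List.nil_append, List.map_id']
    apply PySem.List.sorted_eq_of_perm_of_pairwise_lt
    · rw [List.perm_ext_iff_of_nodup
        ((PySem.List.nodup_pyRange_one 0 n).filter _) (pv_nodup_reach n (tnvdDict timestamps) i)]
      intro x
      rw [List.mem_filter, pv_mem_reach n timestamps hk i x, PySem.List.mem_pyRange_one]
      have hcond := pv_cond_iff i x (pvRow n timestamps i) (pvCol n timestamps x) hrow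
        (pvBestIn n timestamps)
      constructor
      · rintro ⟨hx, hb⟩
        have hbx := hcond (pv_bestIn_getD n timestamps x ⟨hx.1, hx.2⟩)
        obtain ⟨t1, h1, t2, h2, hlt⟩ := hbx.1 hb
        exact ⟨⟨hx.1, hx.2⟩, t1, (pv_mem_ms n timestamps i x hi t1).1 h1,
          t2, (pv_mem_Ms n timestamps i x ⟨hx.1, hx.2⟩ t2).1 h2, hlt⟩
      · rintro ⟨hx, t1, h1, t2, h2, hlt⟩
        have hbx := hcond (pv_bestIn_getD n timestamps x ⟨hx.1, hx.2⟩)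
        exact ⟨⟨hx.1, hx.2⟩, hbx.2 ⟨t1, (pv_mem_ms n timestamps i x hi t1).2 h1,
          t2, (pv_mem_Ms n timestamps i x ⟨hx.1, hx.2⟩ t2).2 h2, hlt⟩⟩
    · exact (PySem.List.pairwise_lt_pyRange_one 0 n).filter _
-- ===== VERDICT (by name: the statement is the Claim_ definition above) =====
theorem temporal_neighborhoods_vertex_disjoint_spec : Claim_equal_temporal_neighborhoods_vertex_disjoint := by
  intro n timestamps _hdom hpre
  unfold Spec_temporal_neighborhoods_vertex_disjoint
  have halt : temporal_neighborhoods_vertex_disjoint_alt n timestamps =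
      ((PySem.List.pyRange 0 n 1).foldl (fun out i =>
        out.insert i (tnvdReachAlt n i (pvBestIn n timestamps)
          ((tnvdRows n timestamps).getD i []))) PySem.Dict.empty).items := rfl
  rw [halt]
  unfold temporal_neighborhoods_vertex_disjoint
  simp only []
  congr 1
  apply PySem.List.foldl_congr_mem
  intro acc i hi
  rw [PySem.List.mem_pyRange_one] at hi
  rw [pv_reach_eq n timestamps hpre i ⟨hi.1, hi.2⟩]
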